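-- pv_equiv track=rewrite | github.com/grasshopperTrainer/coding_practice | baekjoon/accepted/1099 알 수 없는 문장.py | solution
-- ===== SOURCE A (Python) =====
-- from collections import Counter
-- from math import inf, isinf
--
-- def solution(sentence, words):
--     L = len(sentence)
--     char_words = [Counter(list(w)) for w in words]
--
--     dp = {}
--
--     def search(i, cost):
--         if i in dp:
--             return cost + dp[i]  # cost to here + cost from here
--         if i == L:
--             return cost
--
--         min_cost = inf
--         for w, cw in zip(words, char_words):
--             if i + len(w) <= L and Counter(sentence[i:i + len(w)]) == cw:
--                 # calc cost
--                 c = 0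
--                 for a, b in zip(w, sentence[i:i + len(w)]):
--                     if a != b:
--                         c += 1
--                 min_cost = min(min_cost, search(i + len(w), cost + c))
--         dp[i] = min_cost - cost  # need best cost from here
--         return min_cost
--
--     r = search(0, 0)
--     if isinf(r):
--         return -1
--     return r
-- ===== SOURCE B (Python) =====
-- def solution(sentence, words):
--     L = len(sentence)
--     # group the (nonempty) words by their letter signature = sorted character tuple
--     groups = {}
--     for w in words:
--         if w:
--             groups.setdefault(tuple(sorted(w)), []).append(w)
--     lengths = sorted({len(w) for w in words if w})
--     # bottom-up table: best[i] = min edit cost to cover sentence[i:], None = impossible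
--     best = [None] * (L + 1)
--     best[L] = 0
--     for i in range(L - 1, -1, -1):
--         b = None
--         for l in lengths:
--             if i + l <= L:
--                 tail = best[i + l]
--                 if tail is not None:
--                     seg = sentence[i:i + l]
--                     for w in groups.get(tuple(sorted(seg)), []):
--                         c = tail + sum(x != y for x, y in zip(w, seg))
--                         if b is None or c < b:
--                             b = c
--         best[i] = b
--     return -1 if best[0] is None else best[0]
-- ===== Notes on version B (the rewrite author's own statement) =====
-- stated objective: faster
-- what changed: A's memoized top-down recursion re-scans the whole word list and builds a fresh Counter of the substring for every word at every position; B groups the words once in a dict keyed by their sorted-character signature and fills a bottom-up table over positions, sorting one substring per (position, distinct word length) and looking the anagram group up.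
import Mathlib
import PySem

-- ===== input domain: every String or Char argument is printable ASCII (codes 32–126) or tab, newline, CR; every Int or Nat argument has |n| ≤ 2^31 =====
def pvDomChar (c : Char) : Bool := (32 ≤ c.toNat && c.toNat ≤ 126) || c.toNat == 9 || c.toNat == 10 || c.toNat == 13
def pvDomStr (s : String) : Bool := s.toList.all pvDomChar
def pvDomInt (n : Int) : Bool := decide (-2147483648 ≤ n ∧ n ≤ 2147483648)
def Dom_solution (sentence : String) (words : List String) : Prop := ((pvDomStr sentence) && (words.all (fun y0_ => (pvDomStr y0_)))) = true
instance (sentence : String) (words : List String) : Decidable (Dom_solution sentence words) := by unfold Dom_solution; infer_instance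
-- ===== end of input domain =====

-- B replaces A's memoized top-down search (which re-scans the whole word list and re-counts a
-- Counter per word at every position) by a bottom-up table over positions with the words grouped
-- once in a dict keyed by their sorted-character signature, so each position only sorts one
-- substring per distinct word length and looks the group up.

-- ===== PORT A =====
-- mismatch cost: 'c = 0; for a, b in zip(w, seg): if a != b: c += 1'
def pvMism (w s : List Char) : Int :=
  (w.zip s).foldl (fun c p => if p.1 ≠ p.2 then c + 1 else c) 0

-- float minimum with infinity: 'none' models math.inf, 'min(inf, x) = x'
def pvOmin : Option Int → Option Int → Option Int
  | none, y => y
  | some x, none => some x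
  | some x, some y => some (min x y)

-- 'def search(i, cost)' with its inner 'for w, cw in zip(words, char_words)' loop; the mutable
-- memo dict 'dp' is threaded through as a map Nat → Option (Option Int) (value none = math.inf).
-- 'fuel' only bounds the recursion depth: every recursive call strictly increases i (all words are
-- nonempty under Pre_solution), so with fuel = len(sentence)+1 the 0-fuel branch is never reached.
mutual
def pvSearch (sc : List Char) (cws : List (List Char × Multiset Char)) (fuel : Nat)
    (i : Nat) (cost : Int) (dp : Nat → Option (Option Int)) :
    Option Int × (Nat → Option (Option Int)) :=
  match fuel with
  | 0 => (none, dp)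
  | fuel' + 1 =>
    match dp i with
    | some v => (v.map (fun d => cost + d), dp)        -- 'return cost + dp[i]'
    | none =>
      if i = sc.length then (some cost, dp)            -- 'if i == L: return cost'
      else
        let st := pvLoop sc cws fuel' i cost cws (none, dp)
        -- 'dp[i] = min_cost - cost; return min_cost'
        (st.1, fun j => if j = i then some (st.1.map (fun v => v - cost)) else st.2 j)
  termination_by (fuel, 0)

def pvLoop (sc : List Char) (cws : List (List Char × Multiset Char)) (fuel : Nat)
    (i : Nat) (cost : Int) (rest : List (List Char × Multiset Char))
    (st : Option Int × (Nat → Option (Option Int))) :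
    Option Int × (Nat → Option (Option Int)) :=
  match rest with
  | [] => st
  | wc :: rest' =>
    let st' :=
      -- 'if i + len(w) <= L and Counter(sentence[i:i+len(w)]) == cw' (Counter equality on
      -- strings is exactly multiset equality of their characters)
      if i + wc.1.length ≤ sc.length ∧ (↑((sc.drop i).take wc.1.length) : Multiset Char) = wc.2 then
        let r := pvSearch sc cws fuel (i + wc.1.length)
                   (cost + pvMism wc.1 ((sc.drop i).take wc.1.length)) st.2
        (pvOmin st.1 r.1, r.2)                         -- 'min_cost = min(min_cost, search(...))'
      else st
    pvLoop sc cws fuel i cost rest' st'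
  termination_by (fuel, rest.length + 1)
end

def solution (sentence : String) (words : List String) : Int :=
  let sc := sentence.toList
  -- char_words = [Counter(list(w)) for w in words], a Counter modeled as a Multiset Char
  let cws := words.map (fun w => (w.toList, (↑w.toList : Multiset Char)))
  match (pvSearch sc cws (sc.length + 1) 0 0 (fun _ => none)).1 with
  | none => -1                                         -- 'if isinf(r): return -1'
  | some v => v

-- ===== PORT B =====
-- tuple(sorted(w))
def pvKeyB (cs : List Char) : List Char := PySem.List.sorted cs id

-- 'sum(x != y for x, y in zip(w, seg))'
def pvMismB (w s : List Char) : Int :=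
  (w.zip s).foldl (fun c p => c + (if p.1 ≠ p.2 then 1 else 0)) 0

-- 'for w in words: if w: groups.setdefault(tuple(sorted(w)), []).append(w)'
-- (setdefault-then-append written as one overwriting insert: identical dict semantics)
def pvGroups (words : List String) : PySem.Dict (List Char) (List (List Char)) :=
  words.foldl
    (fun g w =>
      if w.toList ≠ [] then
        g.insert (pvKeyB w.toList) (g.getD (pvKeyB w.toList) [] ++ [w.toList])
      else g)
    PySem.Dict.empty

-- 'sorted({len(w) for w in words if w})'
def pvLengths (words : List String) : List Nat :=
  PySem.List.sorted
    (PySem.Set.ofList ((words.filter (fun w => decide (w.toList ≠ []))).map (fun w => w.toList.length)))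
    id

-- one iteration of 'for i in range(L-1, -1, -1)': compute b and set best[i] = b
def pvStep (sc : List Char) (groups : PySem.Dict (List Char) (List (List Char)))
    (lengths : List Nat) (best : Nat → Option Int) (i : Nat) : Nat → Option Int :=
  let b :=
    lengths.foldl
      (fun b l =>
        if i + l ≤ sc.length then
          match best (i + l) with
          | none => b                                  -- 'if tail is not None'
          | some tail =>
            let seg := (sc.drop i).take l
            ((groups.getD (pvKeyB seg) []).foldl
              (fun b w =>
                let c := tail + pvMismB w seg
                match b with
                | none => some c                       -- 'if b is None or c < b: b = c'
                | some bv => if c < bv then some c else some bv)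
              b)
        else b)
      none
  fun j => if j = i then b else best j

def solution_alt (sentence : String) (words : List String) : Int :=
  let sc := sentence.toList
  let L := sc.length
  let groups := pvGroups words
  let lengths := pvLengths words
  -- 'best = [None]*(L+1); best[L] = 0', the list modeled as a function Nat → Option Int;
  -- range(L-1, -1, -1) visits L-1, …, 0, i.e. (List.range L).reverse
  let best := ((List.range L).reverse).foldl (pvStep sc groups lengths)
                (fun j => if j = L then some 0 else none)
  match best 0 with
  | none => -1
  | some v => v

-- ===== PRECONDITION & SPEC =====
-- Pre_ excludes exactly the inputs on which A raises: with a nonempty sentence and an empty string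
-- among the words, A's search re-enters itself at the same position forever (RecursionError).
def Pre_solution (sentence : String) (words : List String) : Prop :=
  sentence = "" ∨ "" ∉ words
instance (sentence : String) (words : List String) : Decidable (Pre_solution sentence words) := by
  unfold Pre_solution; infer_instance

def pvWitness_solution : String × List String := ("abcab", ["ab", "c", "ba", "cab"])

def Spec_solution (sentence : String) (words : List String) (out : Int) : Prop :=
  out = solution_alt sentence words
instance (sentence : String) (words : List String) (out : Int) : Decidable (Spec_solution sentence words out) := by
  unfold Spec_solution; infer_instance

-- ===== CLAIM (what is proved, stated in full; the proofs are below) =====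
def Claim_equal_solution : Prop := ∀ (sentence : String) (words : List String),
  Dom_solution sentence words → Pre_solution sentence words →
  Spec_solution sentence words (solution sentence words)

-- ===== LEMMAS AND PROOFS =====

-- the common value function: pvG sc ws fuel i = best cost to cover sc[i:] by (nonempty) words
-- from ws, none = impossible; fuel-stable once fuel > sc.length - i
def pvG (sc : List Char) (ws : List (List Char)) : Nat → Nat → Option Int
  | 0, _ => none
  | fuel + 1, i =>
    if i = sc.length then some 0
    else
      ws.foldl
        (fun acc (w : List Char) =>
          if 0 < w.length ∧ i + w.length ≤ sc.length ∧
              (↑((sc.drop i).take w.length) : Multiset Char) = (↑w : Multiset Char) then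
            pvOmin acc ((pvG sc ws fuel (i + w.length)).map
              (fun v => pvMism w ((sc.drop i).take w.length) + v))
          else acc)
        none

def pvGT (sc : List Char) (ws : List (List Char)) (i : Nat) : Option Int :=
  pvG sc ws (sc.length + 1) i

def pvCond (sc : List Char) (i : Nat) (w : List Char) : Bool :=
  decide (0 < w.length ∧ i + w.length ≤ sc.length ∧
    (↑((sc.drop i).take w.length) : Multiset Char) = (↑w : Multiset Char))

def pvCand (sc : List Char) (ws : List (List Char)) (i : Nat) (w : List Char) : Option Int :=
  (pvGT sc ws (i + w.length)).map (fun v => pvMism w ((sc.drop i).take w.length) + v)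

def pvGood (sc : List Char) (ws : List (List Char)) (dp : Nat → Option (Option Int)) : Prop :=
  ∀ j v, dp j = some v → v = pvGT sc ws j

def cwsOf (ws : List (List Char)) : List (List Char × Multiset Char) :=
  ws.map (fun w => (w, (↑w : Multiset Char)))

lemma pvMismB_eq (w s : List Char) : pvMismB w s = pvMism w s := by
  unfold pvMismB pvMism
  refine PySem.List.foldl_congr_mem _ _ _ _ ?_
  intro acc x _
  split_ifs <;> omega

lemma pvOmin_none_right (a : Option Int) : pvOmin a none = a := by cases a <;> rfl

lemma pvOmin_rc (b x y : Option Int) : pvOmin (pvOmin b x) y = pvOmin (pvOmin b y) x := by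
  cases b <;> cases x <;> cases y <;> simp [pvOmin, min_comm, min_left_comm]

lemma pvOmin_map_add (c : Int) (a b : Option Int) :
    pvOmin (a.map (fun v => c + v)) (b.map (fun v => c + v)) = (pvOmin a b).map (fun v => c + v) := by
  cases a <;> cases b <;> simp [pvOmin]

lemma pvG_stable (sc : List Char) (ws : List (List Char)) :
    ∀ f1 f2 i, sc.length - i < f1 → sc.length - i < f2 → pvG sc ws f1 i = pvG sc ws f2 i := by
  intro f1
  induction f1 with
  | zero => intro f2 i h1; omega
  | succ a ih =>
    intro f2 i h1 h2
    match f2, h2 with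
    | b + 1, h2 =>
      simp only [pvG]
      by_cases hiL : i = sc.length
      · simp [hiL]
      · simp only [if_neg hiL]
        refine PySem.List.foldl_congr_mem _ _ _ _ ?_
        intro acc w _
        by_cases hc : 0 < w.length ∧ i + w.length ≤ sc.length ∧
            (↑((sc.drop i).take w.length) : Multiset Char) = (↑w : Multiset Char)
        · rw [if_pos hc, if_pos hc, ih b (i + w.length) (by omega) (by omega)]
        · rw [if_neg hc, if_neg hc]

lemma pvGT_base (sc : List Char) (ws : List (List Char)) : pvGT sc ws sc.length = some 0 := by
  simp [pvGT, pvG]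

lemma pvGT_unfold (sc : List Char) (ws : List (List Char)) (i : Nat) (hi : i ≠ sc.length) :
    pvGT sc ws i =
      ws.foldl (fun acc w => if pvCond sc i w = true then pvOmin acc (pvCand sc ws i w) else acc) none := by
  unfold pvGT
  conv_lhs => rw [show sc.length + 1 = sc.length + 1 from rfl]
  simp only [pvG, if_neg hi]
  refine PySem.List.foldl_congr_mem _ _ _ _ ?_
  intro acc w _
  by_cases hc : 0 < w.length ∧ i + w.length ≤ sc.length ∧
      (↑((sc.drop i).take w.length) : Multiset Char) = (↑w : Multiset Char)
  · rw [if_pos hc, if_pos (by simpa [pvCond] using hc)]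
    unfold pvCand pvGT
    rw [pvG_stable sc ws sc.length (sc.length + 1) (i + w.length) (by omega) (by omega)]
  · rw [if_neg hc, if_neg (by simpa [pvCond] using hc)]

lemma pvLoop_spec (sc : List Char) (ws : List (List Char)) (H : ∀ w ∈ ws, w ≠ [])
    (fuel i : Nat) (cost : Int)
    (IH : ∀ i' cost' dp, i' ≤ sc.length → sc.length - i' < fuel → pvGood sc ws dp →
      (pvSearch sc (cwsOf ws) fuel i' cost' dp).1 = (pvGT sc ws i').map (fun v => cost' + v) ∧
      pvGood sc ws (pvSearch sc (cwsOf ws) fuel i' cost' dp).2)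
    (hiL : i < sc.length) (hfuel : sc.length - i ≤ fuel) :
    ∀ rest, (∀ wc ∈ rest, wc ∈ cwsOf ws) → ∀ (g : Option Int) dp, pvGood sc ws dp →
      (pvLoop sc (cwsOf ws) fuel i cost rest (g.map (fun v => cost + v), dp)).1 =
        (rest.foldl (fun acc wc => if pvCond sc i wc.1 = true then pvOmin acc (pvCand sc ws i wc.1) else acc) g).map
          (fun v => cost + v) ∧
      pvGood sc ws (pvLoop sc (cwsOf ws) fuel i cost rest (g.map (fun v => cost + v), dp)).2 := by
  intro rest
  induction rest with
  | nil => intro _ g dp hdp; simp only [pvLoop, List.foldl_nil]; exact ⟨trivial, hdp⟩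
  | cons wc rest' ih =>
    intro hrest g dp hdp
    obtain ⟨w, hwmem, hwc⟩ : ∃ w ∈ ws, (w, (↑w : Multiset Char)) = wc := by
      simpa [cwsOf, List.mem_map] using hrest wc List.mem_cons_self
    subst hwc
    simp only [pvLoop, List.foldl_cons]
    by_cases hC : i + w.length ≤ sc.length ∧
        (↑((sc.drop i).take w.length) : Multiset Char) = (↑w : Multiset Char)
    · have hlen : 0 < w.length := List.length_pos_of_ne_nil (H w hwmem)
      have hcond : pvCond sc i w = true := by simp [pvCond, hC.1, hC.2, hlen]
      obtain ⟨hr1, hr2⟩ := IH (i + w.length) (cost + pvMism w ((sc.drop i).take w.length)) dp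
        hC.1 (by omega) hdp
      rw [if_pos hC, if_pos hcond]
      have hmap :
          pvOmin (g.map (fun v => cost + v))
            (pvSearch sc (cwsOf ws) fuel (i + w.length)
              (cost + pvMism w ((sc.drop i).take w.length)) dp).1 =
          (pvOmin g (pvCand sc ws i w)).map (fun v => cost + v) := by
        rw [hr1, ← pvOmin_map_add]
        congr 1
        unfold pvCand
        cases pvGT sc ws (i + w.length) <;> simp [add_assoc]
      rw [hmap]
      exact ih (fun wc h => hrest wc (List.mem_cons_of_mem _ h)) (pvOmin g (pvCand sc ws i w)) _ hr2
    · have hcond : ¬ pvCond sc i w = true := by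
        simp only [pvCond, decide_eq_true_eq, not_and]
        intro _ h1 h2; exact hC ⟨h1, h2⟩
      rw [if_neg hC, if_neg hcond]
      exact ih (fun wc h => hrest wc (List.mem_cons_of_mem _ h)) g dp hdp

lemma pvSearch_spec (sc : List Char) (ws : List (List Char)) (H : ∀ w ∈ ws, w ≠ []) :
    ∀ fuel i cost dp, i ≤ sc.length → sc.length - i < fuel → pvGood sc ws dp →
      (pvSearch sc (cwsOf ws) fuel i cost dp).1 = (pvGT sc ws i).map (fun v => cost + v) ∧
      pvGood sc ws (pvSearch sc (cwsOf ws) fuel i cost dp).2 := by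
  intro fuel
  induction fuel with
  | zero => intro i cost dp hi hf; exact absurd hf (Nat.not_lt_zero _)
  | succ fuel ih =>
    intro i cost dp hi hf hdp
    simp only [pvSearch]
    cases hdpi : dp i with
    | some v =>
      have hv := hdp i v hdpi
      exact ⟨by rw [hv], hdp⟩
    | none =>
      by_cases hiL : i = sc.length
      · subst hiL
        rw [if_pos rfl]
        exact ⟨by rw [pvGT_base]; simp, hdp⟩
      · have hlt : i < sc.length := lt_of_le_of_ne hi hiL
        rw [if_neg hiL]
        have hloop := pvLoop_spec sc ws H fuel i cost ih hlt (by omega) (cwsOf ws)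
          (fun _ h => h) none dp hdp
        simp only [Option.map_none] at hloop
        obtain ⟨h1, h2⟩ := hloop
        set st := pvLoop sc (cwsOf ws) fuel i cost (cwsOf ws) (none, dp) with hst
        have hfold : st.1 = (pvGT sc ws i).map (fun v => cost + v) := by
          rw [h1, pvGT_unfold sc ws i hiL]
          unfold cwsOf
          rw [List.foldl_map]
        refine ⟨hfold, ?_⟩
        intro j v hj
        have hj' : (if j = i then some (st.1.map (fun v => v - cost)) else st.2 j) = some v := hj
        by_cases hji : j = i
        · rw [if_pos hji] at hj'
          injection hj' with h
          subst h
          rw [hji, hfold]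
          cases pvGT sc ws i <;> simp
        · rw [if_neg hji] at hj'
          exact h2 j v hj'

lemma solution_eq (sentence : String) (words : List String) (H : "" ∉ words) :
    solution sentence words =
      match pvGT sentence.toList (words.map String.toList) 0 with
      | none => -1
      | some v => v := by
  have H' : ∀ w ∈ words.map String.toList, w ≠ [] := by
    intro w hw
    obtain ⟨s, hs, rfl⟩ := List.mem_map.mp hw
    rw [Ne, String.toList_eq_nil_iff]
    rintro rfl
    exact H hs
  have hdp : pvGood sentence.toList (words.map String.toList) (fun _ => none) :=
    fun j v h => by cases h
  obtain ⟨h1, -⟩ := pvSearch_spec sentence.toList (words.map String.toList) H'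
      (sentence.toList.length + 1) 0 0 (fun _ => none) (by omega) (by omega) hdp
  have hcws : words.map (fun w => (w.toList, (↑w.toList : Multiset Char))) =
      cwsOf (words.map String.toList) := by
    unfold cwsOf
    rw [List.map_map]
    exact List.map_congr_left (fun w _ => rfl)
  simp only [solution]
  rw [hcws, h1]
  cases pvGT sentence.toList (words.map String.toList) 0 <;> simp

-- ===== B side =====

lemma groups_getD (words : List String) (k : List Char) :
    (pvGroups words).getD k [] =
      (words.map String.toList).filter (fun w => decide (w ≠ []) && decide (pvKeyB w = k)) := by
  suffices h : ∀ (ws : List String) (g : PySem.Dict (List Char) (List (List Char))),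
      (ws.foldl (fun g w =>
        if w.toList ≠ [] then
          g.insert (pvKeyB w.toList) (g.getD (pvKeyB w.toList) [] ++ [w.toList])
        else g) g).getD k [] =
      g.getD k [] ++ (ws.map String.toList).filter (fun w => decide (w ≠ []) && decide (pvKeyB w = k)) by
    simpa [pvGroups, PySem.Dict.getD_empty] using h words PySem.Dict.empty
  intro ws
  induction ws with
  | nil => simp
  | cons w ws ih =>
    intro g
    by_cases he : w.toList = []
    · rw [List.foldl_cons, if_neg (fun h => h he), ih g]
      simp [he]
    · simp only [List.foldl_cons, if_pos he, List.map_cons, List.filter_cons]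
      rw [ih, PySem.Dict.getD_insert]
      by_cases hk : k = pvKeyB w.toList
      · simp [hk, he, List.append_assoc]
      · have : ¬ (pvKeyB w.toList = k) := fun h => hk h.symm
        simp [hk, he, this]

lemma key_eq_iff (a b : List Char) : pvKeyB a = pvKeyB b ↔ a.Perm b := by
  simpa [pvKeyB] using PySem.List.sorted_id_eq_sorted_id_iff_perm a b

lemma mem_lengths (words : List String) (l : Nat) :
    l ∈ pvLengths words ↔ ∃ w ∈ words, w.toList ≠ [] ∧ w.toList.length = l := by
  unfold pvLengths
  rw [(PySem.List.sorted_perm _ _ _).mem_iff, PySem.Set.mem_ofList]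
  simp only [List.mem_map, List.mem_filter, decide_eq_true_eq]
  constructor
  · rintro ⟨w, ⟨hw, hne⟩, rfl⟩; exact ⟨w, hw, hne, rfl⟩
  · rintro ⟨w, hw, hne, rfl⟩; exact ⟨w, ⟨hw, hne⟩, rfl⟩

lemma nodup_lengths (words : List String) : (pvLengths words).Nodup := by
  exact ((PySem.List.sorted_perm _ _ _).nodup_iff).mpr (PySem.Set.nodup_ofList _)

lemma foldl_foldl_flatMap {α β γ : Type} (f : γ → β → γ) (B : α → List β) (ls : List α) (a : γ) :
    ls.foldl (fun b l => (B l).foldl f b) a = (ls.flatMap B).foldl f a := by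
  induction ls generalizing a with
  | nil => rfl
  | cons l ls ih => simp [List.flatMap_cons, List.foldl_append, ih]

lemma pvOmin_foldl_filter (xs : List (Option Int)) (a : Option Int) :
    xs.foldl pvOmin a = (xs.filter (fun x => x.isSome)).foldl pvOmin a := by
  induction xs generalizing a with
  | nil => rfl
  | cons x xs ih =>
    cases x with
    | none => simpa [pvOmin_none_right] using ih a
    | some v => simp [ih]

lemma filter_or_perm {α : Type} (xs : List α) (a b : α → Bool)
    (hdisj : ∀ x ∈ xs, ¬(a x = true ∧ b x = true)) :
    (xs.filter a ++ xs.filter b).Perm (xs.filter (fun x => a x || b x)) := by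
  induction xs with
  | nil => simp
  | cons x xs ih =>
    have hx := hdisj x (List.mem_cons_self)
    have ih' := ih (fun y hy => hdisj y (List.mem_cons_of_mem _ hy))
    by_cases ha : a x = true
    · have hb : ¬ b x = true := fun hb => hx ⟨ha, hb⟩
      simpa [List.filter_cons, ha, hb] using ih'.cons x
    · by_cases hb : b x = true
      · simp only [List.filter_cons, ha, hb, Bool.or_true, ite_true]
        exact List.perm_middle.trans (ih'.cons x)
      · simpa [List.filter_cons, ha, hb] using ih'

lemma partition_perm {α β : Type} [DecidableEq β] (xs : List α) (ls : List β) (f : α → β)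
    (p : α → Bool) (q : β → α → Bool) (hnd : ls.Nodup)
    (hq : ∀ l ∈ ls, ∀ x ∈ xs, (q l x = true ↔ (p x = true ∧ f x = l))) :
    (ls.flatMap (fun l => xs.filter (q l))).Perm
      (xs.filter (fun x => p x && decide (f x ∈ ls))) := by
  induction ls with
  | nil => simp
  | cons l ls ih =>
    rw [List.flatMap_cons]
    have hnd' := List.nodup_cons.mp hnd
    have h1 : xs.filter (q l) = xs.filter (fun x => p x && decide (f x = l)) :=
      List.filter_congr (fun x hx => by
        rw [Bool.eq_iff_iff]; simp [hq l List.mem_cons_self x hx])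
    have ih' := ih hnd'.2 (fun l' hl' x hx => hq l' (List.mem_cons_of_mem _ hl') x hx)
    refine ((List.Perm.append_left _ ih').trans ?_)
    rw [h1]
    have h2 : xs.filter (fun x => (p x && decide (f x = l)) || (p x && decide (f x ∈ ls))) =
        xs.filter (fun x => p x && decide (f x ∈ l :: ls)) :=
      List.filter_congr (fun x hx => by cases hp : p x <;> simp [List.mem_cons])
    refine (filter_or_perm xs _ _ ?_).trans (h2 ▸ List.Perm.refl _)
    rintro x hx ⟨hal, hbl⟩
    simp only [Bool.and_eq_true, decide_eq_true_eq] at hal hbl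
    exact hnd'.1 (hal.2 ▸ hbl.2)


lemma htail_aux {o : Option Int} (h : o.isSome = true) : o = some (o.getD 0) := by
  cases o <;> simp at h ⊢

lemma flatMap_eq_filter {α β : Type} (ls : List α) (c : α → Bool) (B B' : α → List β)
    (h : ∀ l ∈ ls, B l = if c l then B' l else []) :
    ls.flatMap B = (ls.filter c).flatMap B' := by
  induction ls with
  | nil => rfl
  | cons l ls ih =>
    rw [List.flatMap_cons, h l List.mem_cons_self, List.filter_cons,
      ih (fun l' hl' => h l' (List.mem_cons_of_mem _ hl'))]
    by_cases hc : c l = true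
    · simp [hc]
    · simp [hc]

lemma pvStep_ne (sc : List Char) (groups : PySem.Dict (List Char) (List (List Char)))
    (lengths : List Nat) (best : Nat → Option Int) (i j : Nat) (hj : j ≠ i) :
    pvStep sc groups lengths best i j = best j := by
  simp [pvStep, hj]

lemma pvStep_at (sc : List Char) (words : List String) (i : Nat) (hi : i < sc.length)
    (best : Nat → Option Int)
    (hb : ∀ j, i < j → j ≤ sc.length → best j = pvGT sc (words.map String.toList) j) :
    pvStep sc (pvGroups words) (pvLengths words) best i i =
      pvGT sc (words.map String.toList) i := by
  have hseglen : ∀ l : Nat, i + l ≤ sc.length → ((sc.drop i).take l).length = l := by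
    intro l hl
    simp [List.length_take, List.length_drop]
    omega
  -- abbreviations
  set wl := words.map String.toList with hwl
  have hlen1 : ∀ l ∈ pvLengths words, 1 ≤ l := by
    intro l hl
    obtain ⟨w, _, hne, hlw⟩ := (mem_lengths words l).mp hl
    have := List.length_pos_of_ne_nil hne
    omega
  -- the candidate predicate on the A side
  set PA : List Char → Bool :=
    (fun w => (pvCand sc wl i w).isSome && pvCond sc i w) with hPA
  set Cl : Nat → Bool := (fun l => decide (i + l ≤ sc.length) && (best (i + l)).isSome) with hCl
  set Block : Nat → List (Option Int) := (fun l =>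
    if i + l ≤ sc.length then
      match best (i + l) with
      | none => []
      | some tail =>
        ((pvGroups words).getD (pvKeyB ((sc.drop i).take l)) []).map
          (fun w => some (tail + pvMismB w ((sc.drop i).take l)))
    else []) with hBlock
  -- Step 1: the inner double fold is a pvOmin fold over the flattened candidate blocks
  have step1 :
      pvStep sc (pvGroups words) (pvLengths words) best i i =
      ((pvLengths words).flatMap Block).foldl pvOmin none := by
    simp only [pvStep, if_pos rfl]
    rw [← foldl_foldl_flatMap]
    refine PySem.List.foldl_congr_mem _ _ _ _ ?_
    intro b l _
    by_cases hl : i + l ≤ sc.length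
    · cases hbest : best (i + l) with
      | none => simp [hBlock, hl, hbest]
      | some tail =>
        simp only [hBlock, if_pos hl, hbest]
        rw [List.foldl_map]
        refine PySem.List.foldl_congr_mem _ _ _ _ ?_
        intro acc w _
        cases acc with
        | none => rfl
        | some bv =>
          simp only [pvOmin]
          split_ifs with h <;> simp <;> omega
    · simp [hBlock, hl]
  -- Step 2: pvGT i is a pvOmin fold over the A-side candidate list
  have step2 :
      pvGT sc wl i =
      (((wl.filter PA).map (pvCand sc wl i))).foldl pvOmin none := by
    rw [pvGT_unfold sc wl i (Nat.ne_of_lt hi)]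
    rw [PySem.List.foldl_if_eq_foldl_filter (pvCond sc i)
      (fun acc w => pvOmin acc (pvCand sc wl i w))]
    rw [← List.foldl_map, pvOmin_foldl_filter, List.filter_map, List.filter_filter]
    rfl
  -- Step 3: the two candidate lists are permutations of each other
  have hgroups : ∀ l : Nat,
      (pvGroups words).getD (pvKeyB ((sc.drop i).take l)) [] =
      wl.filter (fun w => decide (w ≠ []) && decide (pvKeyB w = pvKeyB ((sc.drop i).take l))) :=
    fun l => groups_getD words _
  -- blocks are nonempty only on lengths satisfying Cl, where they are group-candidate maps
  have step3 :
      (pvLengths words).flatMap Block =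
      (((pvLengths words).filter Cl).flatMap
        (fun l => (wl.filter (fun w => decide (w ≠ []) && decide (pvKeyB w = pvKeyB ((sc.drop i).take l)))).map
          (pvCand sc wl i))) := by
    rw [flatMap_eq_filter (c := Cl)
      (B' := fun l =>
        ((pvGroups words).getD (pvKeyB ((sc.drop i).take l)) []).map
          (fun w => some ((best (i + l)).getD 0 + pvMismB w ((sc.drop i).take l))))]
    · refine List.flatMap_congr ?_ -- per-block: candidate values coincide
      intro l hl
      rw [List.mem_filter] at hl
      obtain ⟨hlmem, hcl⟩ := hl
      simp only [hCl, Bool.and_eq_true, decide_eq_true_eq] at hcl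
      obtain ⟨hle, hsome⟩ := hcl
      rw [hgroups l]
      refine List.map_congr_left ?_
      intro w hw
      rw [List.mem_filter] at hw
      obtain ⟨hwmem, hq⟩ := hw
      simp only [Bool.and_eq_true, decide_eq_true_eq] at hq
      obtain ⟨hne, hkey⟩ := hq
      have hperm : w.Perm ((sc.drop i).take l) := (key_eq_iff _ _).mp hkey
      have hwlen : w.length = l := by rw [hperm.length_eq, hseglen l hle]
      have hGb : best (i + l) = pvGT sc wl (i + l) :=
        hb (i + l) (by have := hlen1 l hlmem; omega) hle
      obtain ⟨tail, htail⟩ := Option.isSome_iff_exists.mp hsome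
      unfold pvCand
      rw [hwlen, ← hGb, htail]
      simp [pvMismB_eq, Int.add_comm]
    · intro l _
      by_cases hl : i + l ≤ sc.length
      · cases hbest : best (i + l) with
        | none => simp [hBlock, hCl, hl, hbest]
        | some tail => simp [hBlock, hCl, hl, hbest]
      · simp [hBlock, hCl, hl]
  -- the word-level permutation between the grouped blocks and the A-side filter
  have hq : ∀ l ∈ (pvLengths words).filter Cl, ∀ w ∈ wl,
      ((fun (l : Nat) (w : List Char) =>
          decide (w ≠ []) && decide (pvKeyB w = pvKeyB ((sc.drop i).take l))) l w = true ↔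
        (PA w = true ∧ w.length = l)) := by
    intro l hl w hwmem
    rw [List.mem_filter] at hl
    obtain ⟨hlmem, hcl⟩ := hl
    simp only [hCl, Bool.and_eq_true, decide_eq_true_eq] at hcl
    obtain ⟨hle, hsome⟩ := hcl
    have hl1 := hlen1 l hlmem
    have hGb : best (i + l) = pvGT sc wl (i + l) := hb (i + l) (by omega) hle
    simp only [Bool.and_eq_true, decide_eq_true_eq]
    constructor
    · rintro ⟨hne, hkey⟩
      have hperm : w.Perm ((sc.drop i).take l) := (key_eq_iff _ _).mp hkey
      have hwlen : w.length = l := by rw [hperm.length_eq, hseglen l hle]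
      refine ⟨?_, hwlen⟩
      simp only [hPA, Bool.and_eq_true]
      constructor
      · unfold pvCand
        rw [hwlen, ← hGb, htail_aux hsome]
        rfl
      · simp only [pvCond, decide_eq_true_eq]
        refine ⟨List.length_pos_of_ne_nil hne, by omega, ?_⟩
        rw [hwlen]
        exact Multiset.coe_eq_coe.mpr hperm.symm
    · rintro ⟨hpa, hwlen⟩
      have hcond : pvCond sc i w = true := by
        have h' := hpa
        simp only [hPA, Bool.and_eq_true] at h'
        exact h'.2
      simp only [pvCond, decide_eq_true_eq] at hcond
      obtain ⟨hpos, -, hmseq⟩ := hcond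
      have hperm : w.Perm ((sc.drop i).take l) := by
        rw [← hwlen]
        exact (Multiset.coe_eq_coe.mp hmseq).symm
      exact ⟨List.ne_nil_of_length_pos hpos, (key_eq_iff _ _).mpr hperm⟩
  have hperm := partition_perm wl ((pvLengths words).filter Cl) List.length PA
      (fun (l : Nat) (w : List Char) =>
        decide (w ≠ []) && decide (pvKeyB w = pvKeyB ((sc.drop i).take l)))
      ((nodup_lengths words).filter _) hq
  have hfiltereq :
      wl.filter (fun w => PA w && decide (w.length ∈ (pvLengths words).filter Cl)) =
      wl.filter PA := by
    refine List.filter_congr ?_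
    intro w hwmem
    by_cases hpa : PA w = true
    · have h' : (pvCand sc wl i w).isSome = true ∧ pvCond sc i w = true := by
        simpa [hPA, Bool.and_eq_true] using hpa
      obtain ⟨hcand, hcond⟩ := h'
      simp only [pvCond, decide_eq_true_eq] at hcond
      obtain ⟨hpos, hle, -⟩ := hcond
      have hGb : best (i + w.length) = pvGT sc wl (i + w.length) :=
        hb (i + w.length) (by omega) hle
      obtain ⟨w0, hw0, rfl⟩ := List.mem_map.mp hwmem
      have hmem : w0.toList.length ∈ pvLengths words :=
        (mem_lengths words _).mpr ⟨w0, hw0, List.ne_nil_of_length_pos hpos, rfl⟩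
      have hclw : Cl w0.toList.length = true := by
        simp only [hCl, Bool.and_eq_true, decide_eq_true_eq]
        refine ⟨hle, ?_⟩
        rw [hGb]
        unfold pvCand at hcand
        simpa using hcand
      simp only [hpa, Bool.true_and, decide_eq_true_eq, List.mem_filter]
      exact ⟨by simpa using hmem, by simpa using hclw⟩
    · simp [hpa]
  have hperm2 :
      (((pvLengths words).filter Cl).flatMap
        (fun l => wl.filter (fun w => decide (w ≠ []) && decide (pvKeyB w = pvKeyB ((sc.drop i).take l)))))
      |>.Perm (wl.filter PA) := hfiltereq ▸ hperm
  rw [step1, step3, ← List.map_flatMap, step2]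
  letI : RightCommutative pvOmin := ⟨fun b x y => pvOmin_rc b x y⟩
  exact List.Perm.foldl_eq (hperm2.map _) none

lemma table_spec (sc : List Char) (words : List String) :
    ∀ m, m ≤ sc.length → ∀ (b : Nat → Option Int),
      (∀ j, m ≤ j → j ≤ sc.length → b j = pvGT sc (words.map String.toList) j) →
      ∀ j, j ≤ sc.length →
        (((List.range m).reverse).foldl (pvStep sc (pvGroups words) (pvLengths words)) b) j =
          pvGT sc (words.map String.toList) j := by
  intro m
  induction m with
  | zero => intro _ b hbb j hj; simpa using hbb j (Nat.zero_le j) hj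
  | succ m ih =>
    intro hm b hbb j hj
    rw [List.range_succ, List.reverse_append]
    simp only [List.reverse_singleton, List.singleton_append, List.foldl_cons]
    refine ih (by omega) (pvStep sc (pvGroups words) (pvLengths words) b m) ?_ j hj
    intro j' hj1 hj2
    by_cases hjm : j' = m
    · subst hjm
      exact pvStep_at sc words j' (by omega) b (fun j hja hjb => hbb j (by omega) hjb)
    · rw [pvStep_ne _ _ _ _ _ _ hjm]
      exact hbb j' (by omega) hj2

lemma solution_alt_eq (sentence : String) (words : List String) :
    solution_alt sentence words =
      match pvGT sentence.toList (words.map String.toList) 0 with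
      | none => -1
      | some v => v := by
  have hinit : ∀ j, sentence.toList.length ≤ j → j ≤ sentence.toList.length →
      (fun j => if j = sentence.toList.length then some (0 : Int) else none) j =
        pvGT sentence.toList (words.map String.toList) j := by
    intro j h1 h2
    have hj : j = sentence.toList.length := le_antisymm h2 h1
    subst hj
    show (if sentence.toList.length = sentence.toList.length then some (0 : Int) else none) =
      pvGT sentence.toList (words.map String.toList) sentence.toList.length
    rw [if_pos rfl, pvGT_base]
  have heq := table_spec sentence.toList words sentence.toList.length le_rfl _ hinit 0
    (Nat.zero_le _)
  simp only [solution_alt]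
  rw [heq]

lemma empty_case (words : List String) : solution "" words = solution_alt "" words := by
  simp [solution, solution_alt, pvSearch]

-- ===== VERDICT (by name: the statement is the Claim_ definition above) =====
theorem solution_spec : Claim_equal_solution := by
  intro sentence words _ hpre
  unfold Spec_solution
  by_cases hw : "" ∈ words
  · rcases hpre with h | h
    · subst h; exact empty_case words
    · exact absurd hw h
  · rw [solution_eq sentence words hw, solution_alt_eq]
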